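-- pv_equiv track=rewrite | github.com/NickOneRG/LeetCode | LeetCode/inte/TikTok_ugookoh.py | minCommon
-- ===== SOURCE A (Python) =====
-- from typing import List
-- from collections import defaultdict
--
-- def minCommon(n: int, data: List[int]) -> List[int]:
--     idx = defaultdict(list)
--     for i, num in enumerate(data):
--         idx[num].append(i)
--
--     res = [float('inf')] * n
--     for num in idx:
--         indices = [-1] + idx[num] + [n]
--         max_gap = max(j - i for i, j in zip(indices, indices[1:]))
--         if max_gap <= n:
--             res[max_gap - 1] = min(res[max_gap - 1], num)
--
--     for i in range(1, n):
--         res[i] = min(res[i], res[i - 1])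
--
--     return [-1 if num == float('inf') else num for num in res]
-- ===== SOURCE B (Python) =====
-- from typing import List
--
-- def minCommon(n: int, data: List[int]) -> List[int]:
--     # Sort (value, index) pairs, scan each equal-value run to get its max gap,
--     # and fill answer segments right-to-left frontier-style: since values come
--     # in ascending order, the first writer of a cell is the minimum, so no
--     # bucket array and no prefix-min pass are needed.
--     pairs = sorted((num, i) for i, num in enumerate(data))
--     ans = [-1] * n
--     lo = n                      # cells [lo, n) are already filled
--     k = 0
--     m = len(pairs)
--     while k < m:
--         v = pairs[k][0]
--         prev = -1
--         g = 0
--         while k < m and pairs[k][0] == v: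
--             d = pairs[k][1] - prev
--             if d > g:
--                 g = d
--             prev = pairs[k][1]
--             k += 1
--         d = n - prev
--         if d > g:
--             g = d
--         if g <= n:
--             for j in range(g - 1, lo):
--                 ans[j] = v
--             if g - 1 < lo:
--                 lo = g - 1
--     return ans
-- ===== Notes on version B (the rewrite author's own statement) =====
-- stated objective: alternative
-- what changed: Replaces the dict-of-index-lists plus bucket array plus prefix-min passes by sorting (value,index) pairs once, scanning each equal-value run for its max gap, and filling answer segments against a moving frontier so the ascending value order makes the first writer the minimum (no dict, no buckets, no prefix-min).
import Mathlib
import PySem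

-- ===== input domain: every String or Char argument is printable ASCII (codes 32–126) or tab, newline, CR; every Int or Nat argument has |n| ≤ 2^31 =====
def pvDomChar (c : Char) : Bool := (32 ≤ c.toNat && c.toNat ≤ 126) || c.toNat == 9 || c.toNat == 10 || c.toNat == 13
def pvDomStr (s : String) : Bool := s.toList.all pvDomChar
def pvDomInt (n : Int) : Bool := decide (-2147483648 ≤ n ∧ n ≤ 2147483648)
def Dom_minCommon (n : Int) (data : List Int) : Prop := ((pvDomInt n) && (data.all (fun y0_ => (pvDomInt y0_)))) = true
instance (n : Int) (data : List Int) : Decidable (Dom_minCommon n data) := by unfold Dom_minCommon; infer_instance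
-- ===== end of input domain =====

-- B sorts (value,index) pairs once, scans each equal-value run for its max gap and fills
-- answer segments against a moving frontier (ascending values make the first writer the
-- minimum), replacing A's dict of index lists, bucket array and prefix-min pass.

-- ===== PORT A =====
-- Python's float('inf') sentinel is modelled as `none`; `aMin` is min over Int ∪ {inf},
-- exact because A only ever min-compares the sentinel with ints and other cells.
def aMin (v b : Option Int) : Option Int :=
  match v, b with
  | none, b => b
  | some x, none => some x
  | some x, some y => some (min x y)

def minCommon (n : Int) (data : List Int) : List Int :=
  let idx := (PySem.List.enumerate data).foldl
      (fun d p => d.modify p.2 [] (fun l => l ++ [p.1])) PySem.Dict.empty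
  let res0 : List (Option Int) := List.replicate n.toNat none   -- [float('inf')] * n
  let res1 := idx.items.foldl (fun res p =>
      let indices : List Int := [-1] ++ p.2 ++ [n]
      match PySem.List.max? ((indices.zip indices.tail).map (fun q => q.2 - q.1)) (fun g => g) with
      | none => res   -- unreachable: indices always has ≥ 2 elements, so the gap list is nonempty
      | some max_gap =>
        if max_gap ≤ n then
          PySem.List.pySetD res (max_gap - 1)
            (aMin (PySem.List.pyGetD res (max_gap - 1) none) (some p.1))
        else res) res0
  let res2 := (PySem.List.pyRange 1 n 1).foldl (fun res i =>
      PySem.List.pySetD res i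
        (aMin (PySem.List.pyGetD res i none) (PySem.List.pyGetD res (i - 1) none))) res1
  res2.map (fun o => match o with | none => -1 | some v => v)

-- ===== PORT B =====
-- inner while: consume the run of pairs whose first component is v, keeping running
-- max gap g and last index prev
def runB (v prev g : Int) : List (Int × Int) → Int × Int × List (Int × Int)
  | [] => (g, prev, [])
  | p :: t =>
    if p.1 = v then runB v p.2 (if p.2 - prev > g then p.2 - prev else g) t
    else (g, prev, p :: t)

theorem runB_length_le (v prev g : Int) :
    ∀ (l : List (Int × Int)), (runB v prev g l).2.2.length ≤ l.length := by
  intro l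
  induction l generalizing prev g with
  | nil => simp [runB]
  | cons p t ih =>
    by_cases h : p.1 = v
    · simp only [runB, if_pos h]
      exact le_trans (ih _ _) (by simp)
    · simp [runB, if_neg h]

-- outer while over the sorted pairs
def outerB (n : Int) : List (Int × Int) → List Int → Int → List Int
  | [], ans, _ => ans
  | p :: t, ans, lo =>
    let r := runB p.1 (-1) 0 (p :: t)
    let g := if n - r.2.1 > r.1 then n - r.2.1 else r.1
    if g ≤ n then
      outerB n r.2.2
        ((PySem.List.pyRange (g - 1) lo 1).foldl (fun acc j => PySem.List.pySetD acc j p.1) ans)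
        (if g - 1 < lo then g - 1 else lo)
    else outerB n r.2.2 ans lo
termination_by l => l.length
decreasing_by
  all_goals
    simp only [runB]
    exact Nat.lt_succ_of_le (runB_length_le _ _ _ t)

def minCommon_alt (n : Int) (data : List Int) : List Int :=
  let pairs := PySem.List.sorted2
      ((PySem.List.enumerate data).map (fun q => (q.2, q.1)))
      (fun x => x.1) (fun x => x.2) false
  outerB n pairs (List.replicate n.toNat (-1)) n

-- ===== PRECONDITION & SPEC =====
def Spec_minCommon (n : Int) (data : List Int) (out : List Int) : Prop := out = minCommon_alt n data
instance (n : Int) (data : List Int) (out : List Int) : Decidable (Spec_minCommon n data out) := by unfold Spec_minCommon; infer_instance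

-- ===== CLAIM (what is proved, stated in full; the proofs are below) =====
def Claim_equal_minCommon : Prop := ∀ (n : Int) (data : List Int), Dom_minCommon n data → Spec_minCommon n data (minCommon n data)

-- ===== LEMMAS AND PROOFS =====

-- consecutive differences ("zip diffs") of a list
def zd : List Int → List Int
  | a :: b :: t => (b - a) :: zd (b :: t)
  | _ => []

-- max gap of an index list, boundary -1 in front
def Mg (l : List Int) : Int :=
  match zd (-1 :: l) with
  | [] => 0
  | g :: gs => gs.foldl max g

-- occurrence indices of v in data
def occ (data : List Int) (v : Int) : List Int :=
  ((PySem.List.enumerate data).filter (fun p => p.2 == v)).map (fun p => p.1)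

-- the max gap statistic both programs compute for a value v of data
def G (n : Int) (data : List Int) (v : Int) : Int :=
  max (Mg (occ data v)) (n - (occ data v).getLastD (-1))

-- min over the members of l satisfying p, none if there are none
def omin (p : Int → Bool) (l : List Int) : Option Int :=
  l.foldl (fun r v => if p v then aMin r (some v) else r) none

def toOut : Option Int → Int
  | none => -1
  | some v => v

-- the common specification both ports are reduced to
def specOut (n : Int) (data : List Int) (vs : List Int) : List Int :=
  (List.range n.toNat).map (fun (j : Nat) => toOut (omin (fun v => G n data v ≤ (j : Int) + 1) vs))

-- prefix-min scan over Option Int (none = inf), carrying the previous cell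
def pscan : Option Int → List (Option Int) → List (Option Int)
  | _, [] => []
  | b, v :: t => aMin v b :: pscan (aMin v b) t

theorem aMin_none_right (v : Option Int) : aMin v none = v := by cases v <;> rfl

theorem aMin_comm (a b : Option Int) : aMin a b = aMin b a := by
  cases a <;> cases b <;> simp [aMin, min_comm]

theorem aMin_assoc (a b c : Option Int) : aMin (aMin a b) c = aMin a (aMin b c) := by
  cases a <;> cases b <;> cases c <;> simp [aMin, min_assoc]

-- zd / Mg toolbox
theorem zd_eq : ∀ (l : List Int), (l.zip l.tail).map (fun q => q.2 - q.1) = zd l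
  | [] => rfl
  | [_] => rfl
  | a :: b :: t => by simpa [zd, List.zip_cons_cons] using zd_eq (b :: t)

theorem zd_append : ∀ (a x : Int) (l : List Int) (h : l ≠ []),
    zd (a :: (l ++ [x])) = zd (a :: l) ++ [x - l.getLast h]
  | _, _, [_], _ => by simp [zd]
  | a, x, y :: z :: t, _ => by
    have ih := zd_append y x (z :: t) (by simp)
    simp only [List.cons_append] at ih ⊢
    rw [show zd (a :: y :: z :: (t ++ [x])) = (y - a) :: zd (y :: z :: (t ++ [x])) from rfl, ih,
        show zd (a :: y :: z :: t) = (y - a) :: zd (y :: z :: t) from rfl]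
    simp [List.getLast_cons]

theorem one_le_Mg (l : List Int) (h : l ≠ []) (hpos : ∀ x ∈ l, 0 ≤ x) : 1 ≤ Mg l := by
  obtain ⟨y, t, rfl⟩ := List.exists_cons_of_ne_nil h
  have hy : 0 ≤ y := hpos y (by simp)
  have hle := (PySem.List.le_foldl_max (zd (y :: t)) (y - (-1))).1
  simp only [Mg, zd]
  omega

theorem maxA_eq (n : Int) (l : List Int) (h : l ≠ []) :
    PySem.List.max? (zd (-1 :: (l ++ [n]))) (fun g => g)
      = some (max (Mg l) (n - l.getLast h)) := by
  obtain ⟨y, t, rfl⟩ := List.exists_cons_of_ne_nil h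
  have hz := zd_append (-1) n (y :: t) (by simp)
  simp only [List.cons_append] at hz ⊢
  rw [hz, show zd (-1 :: y :: t) = (y - -1) :: zd (y :: t) from rfl, List.cons_append,
      PySem.List.max?_id_cons]
  simp [Mg, zd, List.foldl_append]

-- ---- occ facts ----
theorem occ_nonneg (data : List Int) (v : Int) : ∀ x ∈ occ data v, 0 ≤ x := by
  intro x hx
  obtain ⟨p, hp, rfl⟩ := List.mem_map.1 hx
  obtain ⟨k, hk, rfl⟩ := (PySem.List.mem_enumerate_iff data 0 p).1 (List.mem_filter.1 hp).1
  simp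

theorem occ_pairwise (data : List Int) (v : Int) : (occ data v).Pairwise (· < ·) := by
  unfold occ
  rw [List.pairwise_map]
  exact (PySem.List.pairwise_lt_enumerate data 0).filter _

theorem occ_ne_nil (data : List Int) (v : Int) (h : v ∈ data) : occ data v ≠ [] := by
  obtain ⟨k, hk, rfl⟩ := List.mem_iff_getElem.1 h
  refine List.ne_nil_of_mem (a := (0 + (k : Int))) ?_
  refine List.mem_map.2 ⟨((0 : Int) + k, data[k]), List.mem_filter.2 ⟨?_, by simp⟩, rfl⟩
  exact (PySem.List.mem_enumerate_iff data 0 _).2 ⟨k, hk, rfl⟩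

theorem occ_append (data : List Int) (x v : Int) :
    occ (data ++ [x]) v = occ data v ++ (if x = v then [(data.length : Int)] else []) := by
  unfold occ
  rw [PySem.List.enumerate_append, List.filter_append, List.map_append]
  congr 1
  by_cases h : x = v <;>
    simp [PySem.List.enumerate_cons, PySem.List.enumerate_nil, h]

theorem one_le_G (n : Int) (data : List Int) (v : Int) (h : v ∈ data) : 1 ≤ G n data v := by
  have := one_le_Mg (occ data v) (occ_ne_nil data v h) (occ_nonneg data v)
  unfold G
  omega

-- ---- omin toolbox ----
theorem omin_append_singleton (p : Int → Bool) (l : List Int) (v : Int) :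
    omin p (l ++ [v]) = if p v then aMin (omin p l) (some v) else omin p l := by
  unfold omin
  rw [List.foldl_append]
  rfl

theorem omin_eq_none (p : Int → Bool) (l : List Int) (h : ∀ v ∈ l, p v = false) :
    omin p l = none := by
  induction l with
  | nil => rfl
  | cons v t ih =>
    show t.foldl _ (if p v then aMin none (some v) else none) = none
    rw [h v (by simp)]
    exact ih (fun w hw => h w (by simp [hw]))

theorem omin_mem_aux (p : Int → Bool) : ∀ (l : List Int) (r : Option Int) (u : Int),
    l.foldl (fun r v => if p v then aMin r (some v) else r) r = some u →
    r = some u ∨ (u ∈ l ∧ p u = true)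
  | [], r, u, h => Or.inl h
  | v :: t, r, u, h => by
    rcases omin_mem_aux p t _ u h with hr | hm
    · simp only at hr
      by_cases hp : p v = true
      · rw [if_pos hp] at hr
        cases r with
        | none =>
          simp only [aMin] at hr
          exact Or.inr ⟨by simp [← Option.some_inj.1 hr], by rwa [← Option.some_inj.1 hr]⟩
        | some x =>
          simp only [aMin, Option.some_inj] at hr
          rcases min_choice x v with hc | hc
          · exact Or.inl (by rw [← hr, hc])
          · exact Or.inr ⟨by simp [← hr, hc], by rw [← hr, hc]; exact hp⟩
      · rw [if_neg hp] at hr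
        exact Or.inl hr
    · exact Or.inr ⟨by simp [hm.1], hm.2⟩

theorem omin_mem (p : Int → Bool) (l : List Int) (u : Int) (h : omin p l = some u) :
    u ∈ l ∧ p u = true := by
  rcases omin_mem_aux p l none u h with hr | hm
  · exact absurd hr (by simp)
  · exact hm

theorem omin_ne_none_aux (p : Int → Bool) : ∀ (l : List Int) (r : Option Int), r ≠ none →
    l.foldl (fun r v => if p v then aMin r (some v) else r) r ≠ none
  | [], _, hr => hr
  | v :: t, r, hr => by
    refine omin_ne_none_aux p t _ ?_
    obtain ⟨x, rfl⟩ := Option.ne_none_iff_exists'.1 hr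
    by_cases hp : p v = true <;> simp [hp, aMin]

theorem omin_isSome (p : Int → Bool) (l : List Int) (u : Int) (hu : u ∈ l) (hp : p u = true) :
    omin p l ≠ none := by
  unfold omin
  induction l with
  | nil => simp at hu
  | cons v t ih =>
    show t.foldl _ (if p v then aMin none (some v) else none) ≠ none
    rcases List.mem_cons.1 hu with rfl | hu
    · exact omin_ne_none_aux p t _ (by simp [hp, aMin])
    · by_cases hv : p v = true
      · exact omin_ne_none_aux p t _ (by simp [hv, aMin])
      · simpa [hv] using ih hu

theorem omin_perm (p : Int → Bool) (l l' : List Int) (h : l.Perm l') :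
    omin p l = omin p l' := by
  unfold omin
  haveI : RightCommutative (fun (r : Option Int) (v : Int) => if p v then aMin r (some v) else r) :=
    ⟨by
      intro b a₁ a₂
      by_cases h1 : p a₁ = true <;> by_cases h2 : p a₂ = true <;>
        simp only [h1, h2, if_pos, Bool.false_eq_true, if_false]
      rw [aMin_assoc, aMin_assoc, aMin_comm (some a₁) (some a₂)]⟩
  exact h.foldl_eq none

theorem omin_split (n : Int) (data : List Int) (j : Nat) (vs : List Int)
    (hmem : ∀ v ∈ vs, 1 ≤ G n data v) :
    omin (fun v => G n data v ≤ (j : Int) + 1 + 1) vs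
      = aMin (omin (fun v => G n data v = (j : Int) + 1 + 1) vs)
             (omin (fun v => G n data v ≤ (j : Int) + 1) vs) := by
  induction vs using List.reverseRecOn with
  | nil => rfl
  | append_singleton t v ih =>
    have ih' := ih (fun w hw => hmem w (by simp [hw]))
    rw [omin_append_singleton, omin_append_singleton, omin_append_singleton, ih']
    by_cases h1 : G n data v ≤ (j : Int) + 1
    · rw [if_pos (by simpa using by omega), if_neg (by simpa using by omega), if_pos (by simpa using h1)]
      rw [aMin_assoc]
    · by_cases h2 : G n data v = (j : Int) + 1 + 1
      · rw [if_pos (by simpa using by omega), if_pos (by simpa using h2), if_neg (by simpa using h1)]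
        rw [aMin_assoc, aMin_assoc, aMin_comm (some v)]
      · rw [if_neg (by simpa using by omega), if_neg (by simpa using h2), if_neg (by simpa using h1)]

theorem omin_congr (p q : Int → Bool) (vs : List Int) (h : ∀ v ∈ vs, p v = q v) :
    omin p vs = omin q vs := by
  unfold omin
  apply PySem.List.foldl_congr_mem
  intro r v hv
  rw [h v hv]

theorem omin_le_zero (n : Int) (data : List Int) (vs : List Int)
    (hmem : ∀ v ∈ vs, 1 ≤ G n data v) :
    omin (fun v => G n data v ≤ (0 : Int) + 1) vs
      = omin (fun v => G n data v = (0 : Int) + 1) vs := by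
  refine omin_congr _ _ _ (fun v hv => ?_)
  have := hmem v hv
  simp only [decide_eq_decide]
  omega

-- ===== A SIDE =====

-- A's dict: keys are the distinct values, the stored list is occ
theorem dictA_spec (data : List Int) :
    ((PySem.List.enumerate data).foldl
        (fun d p => d.modify p.2 [] (fun l => l ++ [p.1])) PySem.Dict.empty).keys.Nodup ∧
    (∀ v, v ∈ ((PySem.List.enumerate data).foldl
        (fun d p => d.modify p.2 [] (fun l => l ++ [p.1])) PySem.Dict.empty).keys ↔ v ∈ data) ∧
    (∀ v, ((PySem.List.enumerate data).foldl
        (fun d p => d.modify p.2 [] (fun l => l ++ [p.1])) PySem.Dict.empty).getD v []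
        = occ data v) := by
  induction data using List.reverseRecOn with
  | nil =>
    refine ⟨by simp [PySem.List.enumerate_nil, PySem.Dict.keys_empty],
            fun v => by simp [PySem.List.enumerate_nil, PySem.Dict.keys_empty], fun v => ?_⟩
    simp [PySem.List.enumerate_nil, occ, PySem.Dict.getD, PySem.Dict.get?,
      PySem.Dict.empty, PySem.Dict.items]
  | append_singleton data x ih =>
    obtain ⟨hnd, hmem, hget⟩ := ih
    set D := (PySem.List.enumerate data).foldl
        (fun d p => d.modify p.2 [] (fun l => l ++ [p.1])) PySem.Dict.empty with hD
    have hfold : (PySem.List.enumerate (data ++ [x])).foldl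
        (fun d p => d.modify p.2 [] (fun l => l ++ [p.1])) PySem.Dict.empty
        = D.modify x [] (fun l => l ++ [0 + (data.length : Int)]) := by
      rw [PySem.List.enumerate_append, List.foldl_append, ← hD]
      simp [PySem.List.enumerate_cons, PySem.List.enumerate_nil]
    have hkeys := PySem.Dict.keys_modify D x [] (fun l => l ++ [0 + (data.length : Int)])
    rw [hfold]
    by_cases hc : D.contains x = true
    · have hk2 : (D.modify x [] (fun l => l ++ [0 + (data.length : Int)])).keys = D.keys := by
        rw [hkeys, PySem.Dict.keys_insert_of_contains _ _ hc]
      have hxd : x ∈ data := (hmem x).1 ((PySem.Dict.contains_iff_mem_keys _ _).1 hc)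
      refine ⟨by rw [hk2]; exact hnd, fun v => ?_, fun v => ?_⟩
      · rw [hk2, hmem v]
        constructor
        · intro h; exact List.mem_append.2 (Or.inl h)
        · intro h
          rcases List.mem_append.1 h with h | h
          · exact h
          · simp only [List.mem_singleton] at h; exact h ▸ hxd
      · by_cases hvx : v = x
        · subst hvx
          rw [PySem.Dict.getD_modify_self, hget, occ_append, if_pos rfl]
          simp
        · rw [PySem.Dict.getD_modify_of_ne _ _ _ hvx, hget, occ_append,
              if_neg (fun h => hvx h.symm), List.append_nil]
    · have hc' : D.contains x = false := by
        cases h : D.contains x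
        · rfl
        · exact absurd h hc
      have hk2 : (D.modify x [] (fun l => l ++ [0 + (data.length : Int)])).keys
          = D.keys ++ [x] := by
        rw [hkeys, PySem.Dict.keys_insert_of_not_contains _ _ hc']
      have hxk : x ∉ D.keys := fun h => hc ((PySem.Dict.contains_iff_mem_keys _ _).2 h)
      refine ⟨?_, fun v => ?_, fun v => ?_⟩
      · rw [hk2]
        refine List.nodup_append.2 ⟨hnd, by simp, ?_⟩
        intro a ha b hb
        simp only [List.mem_singleton] at hb
        subst hb
        rintro rfl
        exact hxk ha
      · rw [hk2]
        constructor
        · intro h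
          rcases List.mem_append.1 h with h | h
          · exact List.mem_append.2 (Or.inl ((hmem v).1 h))
          · exact List.mem_append.2 (Or.inr h)
        · intro h
          rcases List.mem_append.1 h with h | h
          · exact List.mem_append.2 (Or.inl ((hmem v).2 h))
          · exact List.mem_append.2 (Or.inr h)
      · by_cases hvx : v = x
        · subst hvx
          rw [PySem.Dict.getD_modify_self, hget, occ_append, if_pos rfl]
          simp
        · rw [PySem.Dict.getD_modify_of_ne _ _ _ hvx, hget, occ_append,
              if_neg (fun h => hvx h.symm), List.append_nil]

theorem map_range_set (m : Nat) (f : Nat → Option Int) (k : Nat) (x : Option Int) :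
    ((List.range m).map f).set k x
      = (List.range m).map (fun j => if j = k ∧ k < m then x else f j) := by
  apply List.ext_getElem (by simp)
  intro i h1 h2
  simp only [List.getElem_set, List.getElem_map, List.getElem_range]
  simp only [List.length_set, List.length_map, List.length_range] at h1
  by_cases h : k = i
  · subst h
    rw [if_pos rfl, if_pos ⟨rfl, h1⟩]
  · rw [if_neg h, if_neg (fun hc => h hc.1.symm)]

theorem getLast_eq_getLastD (l : List Int) (h : l ≠ []) : l.getLast h = l.getLastD (-1) := by
  rw [List.getLastD_eq_getLast?, List.getLast?_eq_getLast h]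
  rfl

-- bucket phase of A over an arbitrary value list
theorem bucketA_spec (n : Int) (data : List Int) (vs : List Int)
    (hmem : ∀ v ∈ vs, v ∈ data) :
    vs.foldl (fun res v =>
      let indices : List Int := [-1] ++ occ data v ++ [n]
      match PySem.List.max? ((indices.zip indices.tail).map (fun q => q.2 - q.1)) (fun g => g) with
      | none => res
      | some max_gap =>
        if max_gap ≤ n then
          PySem.List.pySetD res (max_gap - 1)
            (aMin (PySem.List.pyGetD res (max_gap - 1) none) (some v))
        else res) (List.replicate n.toNat none)
    = (List.range n.toNat).map (fun (j : Nat) => omin (fun v => G n data v = (j : Int) + 1) vs) := by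
  induction vs using List.reverseRecOn with
  | nil =>
    apply List.ext_getElem (by simp)
    intro i h1 h2
    simp [omin]
  | append_singleton t v ih =>
    have hv : v ∈ data := hmem v (by simp)
    have ht : ∀ u ∈ t, u ∈ data := fun u hu => hmem u (by simp [hu])
    rw [List.foldl_append, List.foldl_cons, List.foldl_nil, ih ht]
    dsimp only
    have hocc := occ_ne_nil data v hv
    have hcons : ([-1] ++ occ data v ++ [n] : List Int) = -1 :: (occ data v ++ [n]) := by simp
    have hzip : (([-1] ++ occ data v ++ [n]).zip ([-1] ++ occ data v ++ [n]).tail).map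
        (fun (q : Int × Int) => q.2 - q.1) = zd (-1 :: (occ data v ++ [n])) := by
      rw [hcons, zd_eq]
    rw [hzip, maxA_eq n (occ data v) hocc]
    have hG : max (Mg (occ data v)) (n - (occ data v).getLast hocc) = G n data v := by
      unfold G
      rw [getLast_eq_getLastD]
    rw [hG]
    dsimp only
    have hG1 : 1 ≤ G n data v := one_le_G n data v hv
    by_cases hle : G n data v ≤ n
    · rw [if_pos hle]
      have hn0 : 0 < n := by omega
      have hkc : (G n data v - 1) = (((G n data v - 1).toNat : Nat) : Int) := by omega
      set k : Nat := (G n data v - 1).toNat with hk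
      have hkm : k < n.toNat := by omega
      have hget : PySem.List.pyGetD ((List.range n.toNat).map
          (fun (j : Nat) => omin (fun u => G n data u = (j : Int) + 1) t)) (G n data v - 1) none
          = omin (fun u => G n data u = (k : Int) + 1) t := by
        rw [hkc, PySem.List.pyGetD_natCast, List.getD_eq_getElem?_getD,
            List.getElem?_eq_getElem (by simpa using hkm)]
        simp
      rw [hget, hkc, PySem.List.pySetD_natCast, map_range_set]
      refine List.map_congr_left (fun j hj => ?_)
      rw [List.mem_range] at hj
      rw [omin_append_singleton]
      by_cases hEq : G n data v = (j : Int) + 1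
      · have hjk : j = k := by omega
        subst hjk
        rw [if_pos (show k = k ∧ k < n.toNat from ⟨rfl, hkm⟩),
            if_pos (show decide (G n data v = (k : Int) + 1) = true by simpa using hEq)]
      · rw [if_neg (show ¬(j = k ∧ k < n.toNat) from fun hc => hEq (by rw [hc.1]; omega)),
            if_neg (show ¬(decide (G n data v = (j : Int) + 1) = true) by simpa using hEq)]
    · rw [if_neg hle]
      refine List.map_congr_left (fun j hj => ?_)
      rw [List.mem_range] at hj
      have hjn : (j : Int) + 1 ≤ n.toNat := by exact_mod_cast hj
      have hnn : (n.toNat : Int) ≤ max n 0 := by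
        rcases le_or_gt 0 n with h | h
        · rw [Int.toNat_of_nonneg h]; omega
        · simp [Int.toNat_of_nonpos (le_of_lt h)]
      rw [omin_append_singleton, if_neg (by simp only [decide_eq_true_eq]; omega)]

theorem p3A : ∀ (xs init : List (Option Int)) (b : Option Int),
    (PySem.List.pyRange ((init.length : Int) + 1) ((init.length : Int) + 1 + xs.length) 1).foldl
      (fun res i => PySem.List.pySetD res i
        (aMin (PySem.List.pyGetD res i none) (PySem.List.pyGetD res (i - 1) none)))
      (init ++ b :: xs)
    = init ++ b :: pscan b xs
  | [], init, b => by
    rw [PySem.List.pyRange_one_eq_nil (by simp)]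
    simp [pscan]
  | v :: t, init, b => by
    have h1 : ((init.length : Int) + 1) < (init.length : Int) + 1 + ((v :: t).length : Int) := by
      simp only [List.length_cons]; push_cast; omega
    rw [PySem.List.pyRange_one_cons h1, List.foldl_cons]
    have e1 : (init.length : Int) + 1 = ((init.length + 1 : Nat) : Int) := by push_cast; ring
    have hg1 : PySem.List.pyGetD (init ++ b :: v :: t) ((init.length : Int) + 1) none = v := by
      rw [e1, PySem.List.pyGetD_natCast, List.getD_eq_getElem?_getD,
          List.getElem?_append_right (by omega)]
      simp
    have hg0 : PySem.List.pyGetD (init ++ b :: v :: t) ((init.length : Int) + 1 - 1) none = b := by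
      rw [show (init.length : Int) + 1 - 1 = ((init.length : Nat) : Int) by ring,
          PySem.List.pyGetD_natCast, List.getD_eq_getElem?_getD,
          List.getElem?_append_right (by omega)]
      simp
    rw [hg1, hg0, e1, PySem.List.pySetD_natCast, List.set_append_right _ _ (by omega)]
    have hset : (b :: v :: t).set (init.length + 1 - init.length) (aMin v b)
        = [b] ++ aMin v b :: t := by
      rw [show init.length + 1 - init.length = 1 by omega]
      rfl
    rw [hset, ← List.append_assoc]
    have ih := p3A t (init ++ [b]) (aMin v b)
    simp only [List.length_append, List.length_cons, List.length_nil] at ih ⊢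
    push_cast at ih ⊢
    ring_nf at ih ⊢
    rw [ih]
    simp [pscan]

theorem pscan_map (fEq fLe : Nat → Option Int)
    (hstep : ∀ j : Nat, fLe (j + 1) = aMin (fEq (j + 1)) (fLe j)) :
    ∀ (m s : Nat) (b : Option Int), (b = if s = 0 then none else fLe (s - 1)) →
      (s = 0 → fLe 0 = fEq 0) →
      pscan b ((List.range' s m).map fEq) = (List.range' s m).map fLe := by
  intro m
  induction m with
  | zero => intro s b _ _; rfl
  | succ m ih =>
    intro s b hb h0
    rw [List.range'_succ, List.map_cons, List.map_cons]
    show aMin (fEq s) b :: pscan (aMin (fEq s) b) _ = _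
    have hhead : aMin (fEq s) b = fLe s := by
      cases s with
      | zero =>
        rw [hb, if_pos rfl, aMin_none_right, h0 rfl]
      | succ s' =>
        rw [hb, if_neg (by omega)]
        simpa using (hstep s').symm
    rw [hhead, ih (s + 1) (fLe s) (by simp) (by omega)]

theorem prefixA (n : Int) (data : List Int) (vs : List Int) (hvs : ∀ v ∈ vs, v ∈ data) :
    ((PySem.List.pyRange 1 n 1).foldl (fun res i =>
        PySem.List.pySetD res i
          (aMin (PySem.List.pyGetD res i none) (PySem.List.pyGetD res (i - 1) none)))
      ((List.range n.toNat).map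
        (fun (j : Nat) => omin (fun v => G n data v = (j : Int) + 1) vs))).map
      (fun o => match o with | none => -1 | some v => v)
    = specOut n data vs := by
  have hfun : (fun (o : Option Int) => match o with | none => -1 | some v => v) = toOut :=
    funext fun o => by cases o <;> rfl
  have hmem' : ∀ v ∈ vs, 1 ≤ G n data v := fun v hv => one_le_G n data v (hvs v hv)
  by_cases hn : n ≤ 0
  · have h0 : n.toNat = 0 := by omega
    rw [PySem.List.pyRange_one_eq_nil (by omega), List.foldl_nil]
    simp [specOut, h0]
  · push_neg at hn
    have hr : List.range n.toNat = 0 :: List.range' 1 (n.toNat - 1) := by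
      rw [List.range_eq_range']
      cases h : n.toNat with
      | zero => omega
      | succ k => rw [List.range'_succ]; simp [h]
    rw [hr, List.map_cons]
    have hp := p3A ((List.range' 1 (n.toNat - 1)).map
        (fun (j : Nat) => omin (fun v => G n data v = (j : Int) + 1) vs)) []
        (omin (fun v => G n data v = ((0 : Nat) : Int) + 1) vs)
    simp only [List.length_nil, Nat.cast_zero, List.nil_append, zero_add, List.length_map,
      List.length_range'] at hp
    have hb : (1 : Int) + ((n.toNat - 1 : Nat) : Int) = n := by
      have : ((n.toNat : Nat) : Int) = n := by omega
      push_cast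
      omega
    rw [hb] at hp
    simp only [Nat.cast_zero, zero_add] at hp ⊢
    rw [hp]
    have hstep : ∀ (j : Nat),
        omin (fun v => G n data v ≤ (((j + 1 : Nat)) : Int) + 1) vs
          = aMin (omin (fun v => G n data v = (((j + 1 : Nat)) : Int) + 1) vs)
                 (omin (fun v => G n data v ≤ (j : Int) + 1) vs) := by
      intro j
      have hc : (((j + 1 : Nat)) : Int) + 1 = (j : Int) + 1 + 1 := by push_cast; ring
      rw [hc]
      exact omin_split n data j vs hmem'
    rw [pscan_map (fun (j : Nat) => omin (fun v => G n data v = (j : Int) + 1) vs)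
          (fun (j : Nat) => omin (fun v => G n data v ≤ (j : Int) + 1) vs)
          hstep (n.toNat - 1) 1 _
          (by rw [if_neg (by omega)]
              have h := (omin_le_zero n data vs hmem').symm
              simp only [zero_add] at h
              norm_num
              exact h)
          (by omega)]
    rw [hfun]
    unfold specOut
    rw [hr]
    simp only [List.map_cons, List.map_map]
    congr 1
    have h00 := omin_le_zero n data vs hmem'
    norm_num at h00 ⊢
    rw [h00]

-- A's port equals the common specification (over A's key list, then by permutation)
theorem A_spec (n : Int) (data : List Int) :
    minCommon n data = specOut n data (PySem.List.dedup data) := by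
  obtain ⟨hnd, hmem, hget⟩ := dictA_spec data
  unfold minCommon
  dsimp only
  rw [PySem.Dict.items_eq_map_keys _ hnd [], List.foldl_map]
  set K := ((PySem.List.enumerate data).foldl
      (fun d p => d.modify p.2 [] (fun l => l ++ [p.1])) PySem.Dict.empty).keys with hK
  have hKmem : ∀ v ∈ K, v ∈ data := fun v hv => (hmem v).1 hv
  have hfold1 : K.foldl (fun res k =>
        (fun res (p : Int × List Int) =>
          let indices : List Int := [-1] ++ p.2 ++ [n]
          match PySem.List.max? ((indices.zip indices.tail).map (fun q => q.2 - q.1))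
              (fun g => g) with
          | none => res
          | some max_gap =>
            if max_gap ≤ n then
              PySem.List.pySetD res (max_gap - 1)
                (aMin (PySem.List.pyGetD res (max_gap - 1) none) (some p.1))
            else res) res
          (k, ((PySem.List.enumerate data).foldl
              (fun d p => d.modify p.2 [] (fun l => l ++ [p.1])) PySem.Dict.empty).getD k []))
        (List.replicate n.toNat none)
      = K.foldl (fun res v =>
          let indices : List Int := [-1] ++ occ data v ++ [n]
          match PySem.List.max? ((indices.zip indices.tail).map (fun q => q.2 - q.1))
              (fun g => g) with
          | none => res
          | some max_gap =>
            if max_gap ≤ n then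
              PySem.List.pySetD res (max_gap - 1)
                (aMin (PySem.List.pyGetD res (max_gap - 1) none) (some v))
            else res) (List.replicate n.toNat none) := by
    apply PySem.List.foldl_congr_mem
    intro acc k hk
    dsimp only
    rw [hget k]
  rw [hfold1, bucketA_spec n data K hKmem, prefixA n data K hKmem]
  have hperm : K.Perm (PySem.List.dedup data) :=
    (List.perm_ext_iff_of_nodup hnd (PySem.List.nodup_dedup data)).2
      (fun a => by rw [hmem a, PySem.List.mem_dedup])
  unfold specOut
  exact List.map_congr_left (fun j _ => by rw [omin_perm _ _ _ hperm])

-- ===== B SIDE =====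

-- the boolean lex comparator sorted2 uses at our instantiation
def ltB (a b : Int × Int) : Bool :=
  decide (a.1 < b.1) || (!decide (b.1 < a.1) && decide (a.2 < b.2))

def LexLe (a b : Int × Int) : Prop := a.1 < b.1 ∨ (a.1 = b.1 ∧ a.2 ≤ b.2)

theorem lexle_trans {a b c : Int × Int} (h1 : LexLe a b) (h2 : LexLe b c) : LexLe a c := by
  unfold LexLe at *
  omega

theorem ltB_true {a b : Int × Int} (h : ltB a b = true) : LexLe a b := by
  unfold ltB at h
  unfold LexLe
  simp only [Bool.or_eq_true, Bool.and_eq_true, Bool.not_eq_true', decide_eq_true_eq,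
    decide_eq_false_iff_not] at h
  omega

theorem ltB_false {a b : Int × Int} (h : ltB a b = false) : LexLe b a := by
  unfold ltB at h
  unfold LexLe
  simp only [Bool.or_eq_false_iff, Bool.and_eq_false_iff, Bool.not_eq_false',
    decide_eq_true_eq, decide_eq_false_iff_not] at h
  omega

theorem pairwise_insertBy (x : Int × Int) (l : List (Int × Int)) (h : l.Pairwise LexLe) :
    (PySem.List.insertBy ltB x l).Pairwise LexLe := by
  induction l with
  | nil => simp [PySem.List.insertBy]
  | cons y ys ih =>
    rcases List.pairwise_cons.1 h with ⟨hy, hys⟩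
    by_cases hxy : ltB x y = true
    · rw [show PySem.List.insertBy ltB x (y :: ys) = x :: y :: ys from by
        simp [PySem.List.insertBy, hxy]]
      refine List.Pairwise.cons ?_ h
      intro z hz
      rcases List.mem_cons.1 hz with rfl | hz
      · exact ltB_true hxy
      · exact lexle_trans (ltB_true hxy) (hy z hz)
    · rw [show PySem.List.insertBy ltB x (y :: ys) = y :: PySem.List.insertBy ltB x ys from by
        simp [PySem.List.insertBy, hxy]]
      refine List.Pairwise.cons ?_ (ih hys)
      intro z hz
      rcases (PySem.List.mem_insertBy _ _ _ _).1 hz with hzx | hz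
      · rw [hzx]
        have hf : ltB x y = false := by revert hxy; cases ltB x y <;> simp
        exact ltB_false hf
      · exact hy z hz

theorem foldl_insertBy_pairwise : ∀ (xs acc : List (Int × Int)), acc.Pairwise LexLe →
    (xs.foldl (fun acc x => PySem.List.insertBy ltB x acc) acc).Pairwise LexLe
  | [], _, h => h
  | x :: xs, acc, h =>
    foldl_insertBy_pairwise xs _ (pairwise_insertBy x acc h)

theorem sorted2_pairwiseLex (xs : List (Int × Int)) :
    (PySem.List.sorted2 xs (fun x => x.1) (fun x => x.2) false).Pairwise LexLe := by
  show (xs.foldl (fun acc x => PySem.List.insertBy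
      (fun a b => decide (a.1 < b.1) || (!decide (b.1 < a.1) && decide (a.2 < b.2))) x acc)
      []).Pairwise LexLe
  exact foldl_insertBy_pairwise xs [] (by simp)

theorem sorted2_eq_target (xs ys : List (Int × Int)) (hperm : ys.Perm xs)
    (hpw : ys.Pairwise LexLe) :
    PySem.List.sorted2 xs (fun x => x.1) (fun x => x.2) false = ys := by
  refine List.Perm.eq_of_pairwise ?_ (sorted2_pairwiseLex xs) hpw
    ((PySem.List.sorted2_perm xs _ _ false).trans hperm.symm)
  intro a b _ _ h1 h2
  have ha : a.1 = b.1 ∧ a.2 = b.2 := by unfold LexLe at h1 h2; omega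
  exact Prod.ext ha.1 ha.2

theorem flatMap_congr_mem {α β : Type} (vs : List α) (f g : α → List β)
    (h : ∀ v ∈ vs, f v = g v) : vs.flatMap f = vs.flatMap g := by
  induction vs with
  | nil => rfl
  | cons v t ih =>
    rw [List.flatMap_cons, List.flatMap_cons, h v (by simp),
      ih (fun w hw => h w (by simp [hw]))]

-- partition of the pair list by value
theorem flatMap_filter_perm : ∀ (vs : List Int) (ps : List (Int × Int)),
    vs.Nodup → (∀ p ∈ ps, p.1 ∈ vs) →
    (vs.flatMap (fun v => ps.filter (fun p => p.1 == v))).Perm ps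
  | [], ps, _, hcov => by
    have : ps = [] := List.eq_nil_iff_forall_not_mem.2
      (fun p hp => by simpa using hcov p hp)
    subst this
    rfl
  | v :: vs, ps, hnd, hcov => by
    rcases List.pairwise_cons.1 hnd with ⟨hv, hnd'⟩
    rw [List.flatMap_cons]
    have hcong : vs.flatMap (fun u => ps.filter (fun p => p.1 == u))
        = vs.flatMap (fun u => (ps.filter (fun p => !(p.1 == v))).filter
            (fun p => p.1 == u)) := by
      refine flatMap_congr_mem vs _ _ (fun u hu => ?_)
      rw [List.filter_filter]
      refine (List.filter_congr (fun p _ => ?_)).symm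
      by_cases hp : p.1 = u
      · have huv : ¬ u = v := fun hc => hv u hu hc.symm
        simp [hp, huv]
      · simp [hp]
    have hcov' : ∀ p ∈ ps.filter (fun p => !(p.1 == v)), p.1 ∈ vs := by
      intro p hp
      rcases List.mem_filter.1 hp with ⟨hps, hne⟩
      rcases List.mem_cons.1 (hcov p hps) with h | h
      · simp [h] at hne
      · exact h
    have ihp := flatMap_filter_perm vs (ps.filter (fun p => !(p.1 == v))) hnd' hcov'
    rw [hcong]
    exact (List.Perm.append_left _ ihp).trans (List.filter_append_perm _ ps)

theorem filter_pairs_eq (data : List Int) (v : Int) :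
    ((PySem.List.enumerate data).map (fun q => (q.2, q.1))).filter (fun p => p.1 == v)
      = (occ data v).map (fun i => (v, i)) := by
  unfold occ
  rw [List.filter_map, List.map_map]
  have : ((fun (p : Int × Int) => p.1 == v) ∘ (fun (q : Int × Int) => (q.2, q.1)))
      = fun (q : Int × Int) => q.2 == v := rfl
  rw [this]
  refine List.map_congr_left (fun q hq => ?_)
  have hqv : q.2 = v := by simpa using (List.mem_filter.1 hq).2
  simp [hqv]

theorem groups_pairwise (data : List Int) : ∀ (vs : List Int), vs.Pairwise (· < ·) →
    (vs.flatMap (fun v => (occ data v).map (fun i => (v, i)))).Pairwise LexLe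
  | [], _ => by simp
  | v :: vs, h => by
    rcases List.pairwise_cons.1 h with ⟨hv, h'⟩
    rw [List.flatMap_cons]
    refine (List.pairwise_append).2 ⟨?_, groups_pairwise data vs h', ?_⟩
    · rw [List.pairwise_map]
      refine (occ_pairwise data v).imp ?_
      intro a b hab
      exact Or.inr ⟨rfl, le_of_lt hab⟩
    · intro a ha b hb
      obtain ⟨i, hi, rfl⟩ := List.mem_map.1 ha
      obtain ⟨w, hw, hbw⟩ := List.mem_flatMap.1 hb
      obtain ⟨j, hj, rfl⟩ := List.mem_map.1 hbw
      exact Or.inl (by simpa using hv w hw)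

-- the sorted pair list is exactly the ascending-value group concatenation
theorem pairs_eq_groups (data : List Int) :
    PySem.List.sorted2 ((PySem.List.enumerate data).map (fun q => (q.2, q.1)))
        (fun x => x.1) (fun x => x.2) false
      = (PySem.List.sorted (PySem.List.dedup data) (fun x => x) false).flatMap
          (fun v => (occ data v).map (fun i => (v, i))) := by
  apply sorted2_eq_target
  · have h1 : (PySem.List.sorted (PySem.List.dedup data) (fun x => x) false).flatMap
          (fun v => (occ data v).map (fun i => (v, i)))
        = (PySem.List.sorted (PySem.List.dedup data) (fun x => x) false).flatMap
          (fun v => ((PySem.List.enumerate data).map (fun q => (q.2, q.1))).filter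
            (fun p => p.1 == v)) :=
      flatMap_congr_mem _ _ _ (fun v _ => (filter_pairs_eq data v).symm)
    rw [h1]
    refine flatMap_filter_perm _ _ ?_ ?_
    · exact (PySem.List.sorted_perm (PySem.List.dedup data) _ false).symm.nodup
        (PySem.List.nodup_dedup data)
    · intro p hp
      obtain ⟨q, hq, rfl⟩ := List.mem_map.1 hp
      obtain ⟨k, hk, rfl⟩ := (PySem.List.mem_enumerate_iff data 0 q).1 hq
      exact (PySem.List.mem_sorted _ _ _ _).2
        ((PySem.List.mem_dedup data _).2 (by simpa using List.getElem_mem hk))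
  · refine groups_pairwise data _ ?_
    have := PySem.List.sorted_ofList_pairwise_lt (xs := data)
    rwa [← PySem.List.dedup_eq_ofList] at this

-- the inner while consumes exactly the group of v
theorem runB_spec (v : Int) : ∀ (l : List Int) (rest : List (Int × Int)) (prev g : Int),
    (∀ q t', rest = q :: t' → q.1 ≠ v) →
    runB v prev g ((l.map (fun i => (v, i))) ++ rest)
      = ((l.foldl (fun st i => ((if i - st.2 > st.1 then i - st.2 else st.1), i)) (g, prev)).1,
         (l.foldl (fun st i => ((if i - st.2 > st.1 then i - st.2 else st.1), i)) (g, prev)).2,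
         rest)
  | [], rest, prev, g, hh => by
    cases rest with
    | nil => rfl
    | cons q t' =>
      simp only [List.map_nil, List.nil_append, List.foldl_nil, runB,
        if_neg (hh q t' rfl)]
  | i :: l, rest, prev, g, hh => by
    simp only [List.map_cons, List.cons_append, runB, if_pos rfl, List.foldl_cons]
    exact runB_spec v l rest i (if i - prev > g then i - prev else g) hh

-- the run scan computes a running max of consecutive gaps and the last index
theorem runfold_spec : ∀ (l : List Int) (g prev : Int),
    l.foldl (fun st i => ((if i - st.2 > st.1 then i - st.2 else st.1), i)) (g, prev)
      = ((zd (prev :: l)).foldl max g, (prev :: l).getLast (by simp))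
  | [], g, prev => by simp [zd]
  | i :: l, g, prev => by
    rw [List.foldl_cons]
    have hstep : ((if i - (g, prev).2 > (g, prev).1 then i - (g, prev).2 else (g, prev).1, i)
          : Int × Int)
        = (max g (i - prev), i) := by
      dsimp only
      rw [show (if i - prev > g then i - prev else g) = max g (i - prev) by split <;> omega]
    rw [hstep, runfold_spec l (max g (i - prev)) i]
    have hz : zd (prev :: i :: l) = (i - prev) :: zd (i :: l) := rfl
    rw [hz, List.foldl_cons]
    refine Prod.ext rfl ?_
    dsimp only
    show ((i :: l).getLast (by simp)) = ((prev :: i :: l).getLast (by simp))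
    exact (List.getLast_cons (a := prev) (by simp)).symm

theorem Mg_fold0 (i0 : Int) (l : List Int) (h : 0 ≤ i0) :
    (zd (-1 :: i0 :: l)).foldl max 0 = Mg (i0 :: l) := by
  have h1 : Mg (i0 :: l) = (zd (i0 :: l)).foldl max (i0 - -1) := rfl
  have h2 : zd (-1 :: i0 :: l) = (i0 - -1) :: zd (i0 :: l) := rfl
  rw [h1, h2, List.foldl_cons,
    show max 0 (i0 - -1) = i0 - -1 by omega]

theorem fill_aux_length (v : Int) : ∀ (idxs : List Int) (ans : List Int),
    (idxs.foldl (fun acc j => PySem.List.pySetD acc j v) ans).length = ans.length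
  | [], _ => rfl
  | i :: t, ans => by
    rw [List.foldl_cons, fill_aux_length v t, PySem.List.length_pySetD]

theorem fill_length (v a b : Int) (ans : List Int) :
    ((PySem.List.pyRange a b 1).foldl (fun acc j => PySem.List.pySetD acc j v) ans).length
      = ans.length :=
  fill_aux_length v _ ans

theorem pySetD_getElem (ans : List Int) (a : Int) (ha : 0 ≤ a) (v : Int) (j : Nat)
    (hj : j < ans.length) :
    (PySem.List.pySetD ans a v)[j]'(by rw [PySem.List.length_pySetD]; exact hj)
      = if (j : Int) = a then v else ans[j] := by
  obtain ⟨k, rfl⟩ := Int.eq_ofNat_of_zero_le ha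
  simp only [PySem.List.pySetD_natCast, List.getElem_set]
  by_cases h : k = j
  · subst h
    rw [if_pos rfl, if_pos rfl]
  · rw [if_neg h, if_neg (fun hc => h (by exact_mod_cast hc.symm))]

theorem fill_getElem_aux (v : Int) : ∀ (m : Nat) (a b : Int), (b - a).toNat ≤ m → 0 ≤ a →
    ∀ (ans : List Int) (j : Nat) (hj : j < ans.length),
    ((PySem.List.pyRange a b 1).foldl (fun acc j => PySem.List.pySetD acc j v) ans)[j]'(by
        rw [fill_length]; exact hj)
      = if a ≤ (j : Int) ∧ (j : Int) < b then v else ans[j]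
  | 0, a, b, hm, ha, ans, j, hj => by
    rw [List.getElem_of_eq (by rw [PySem.List.pyRange_one_eq_nil (by omega), List.foldl_nil]),
      if_neg (by omega)]
  | m + 1, a, b, hm, ha, ans, j, hj => by
    by_cases hab : b ≤ a
    · rw [List.getElem_of_eq (by rw [PySem.List.pyRange_one_eq_nil hab, List.foldl_nil]),
        if_neg (by omega)]
    · have hcons := PySem.List.pyRange_one_cons (a := a) (b := b) (by omega)
      rw [List.getElem_of_eq (by rw [hcons, List.foldl_cons])]
      have hj' : j < (PySem.List.pySetD ans a v).length := by
        rw [PySem.List.length_pySetD]; exact hj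
      rw [fill_getElem_aux v m (a + 1) b (by omega) (by omega) _ j hj']
      rw [pySetD_getElem ans a ha v j hj]
      by_cases h1 : a + 1 ≤ (j : Int) ∧ (j : Int) < b
      · rw [if_pos h1, if_pos (by omega)]
      · rw [if_neg h1]
        by_cases h2 : (j : Int) = a
        · rw [if_pos h2, if_pos (by omega)]
        · rw [if_neg h2, if_neg (by omega)]

-- the fill loop written pointwise
theorem fill_getElem (v a b : Int) (ha : 0 ≤ a) : ∀ (ans : List Int) (j : Nat)
    (hj : j < ans.length),
    ((PySem.List.pyRange a b 1).foldl (fun acc j => PySem.List.pySetD acc j v) ans)[j]'(by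
        rw [fill_length]; exact hj)
      = if a ≤ (j : Int) ∧ (j : Int) < b then v else ans[j] :=
  fun ans j hj => fill_getElem_aux v (b - a).toNat a b le_rfl ha ans j hj

-- heads of the group concatenation carry a remaining value
theorem groups_head (data : List Int) : ∀ (vs : List Int)
    (q : Int × Int) (t : List (Int × Int)),
    vs.flatMap (fun v => (occ data v).map (fun i => (v, i))) = q :: t → q.1 ∈ vs
  | [], q, t, h => by simp at h
  | v :: vs, q, t, h => by
    rw [List.flatMap_cons] at h
    cases hoc : occ data v with
    | nil =>
      rw [hoc, List.map_nil, List.nil_append] at h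
      exact List.mem_cons_of_mem _ (groups_head data vs q t h)
    | cons i l0 =>
      rw [hoc, List.map_cons, List.cons_append] at h
      injection h with h1 h2
      rw [← h1]
      simp

-- main loop invariant of B
theorem outerB_spec (n : Int) (data : List Int) (hn : 0 < n) :
    ∀ (vs ws : List Int) (ans : List Int) (lo : Int),
    (∀ v ∈ vs, v ∈ data) → (∀ u ∈ ws, u ∈ data) →
    vs.Pairwise (· < ·) → (∀ u ∈ ws, ∀ v ∈ vs, u < v) →
    ans.length = n.toNat → 0 ≤ lo → lo ≤ n →
    (∀ (j : Nat) (hj : j < ans.length),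
        ans[j] = toOut (omin (fun v => G n data v ≤ (j : Int) + 1) ws)) →
    (∀ u ∈ ws, G n data u ≤ n → lo ≤ G n data u - 1) →
    (∀ j : Nat, lo ≤ (j : Int) → j < n.toNat → ∃ u ∈ ws, G n data u ≤ (j : Int) + 1) →
    outerB n (vs.flatMap (fun v => (occ data v).map (fun i => (v, i)))) ans lo
      = specOut n data (ws ++ vs)
  | [], ws, ans, lo => by
    intro _ _ _ _ hlen _ _ h3 _ _
    rw [List.flatMap_nil, List.append_nil]
    have hB : outerB n [] ans lo = ans := by simp [outerB]
    rw [hB]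
    refine List.ext_getElem (by rw [hlen]; simp [specOut]) ?_
    intro j h1 h2
    rw [h3 j h1]
    simp only [specOut, List.getElem_map, List.getElem_range]
  | v :: vs, ws, ans, lo => by
    intro hvall hwall hpw hlt hlen hlo0 hlon h3 h4 h5
    rcases List.pairwise_cons.1 hpw with ⟨hvlt, hpw'⟩
    have hvd : v ∈ data := hvall v (by simp)
    have hnn : ((n.toNat : Nat) : Int) = n := Int.toNat_of_nonneg (le_of_lt hn)
    obtain ⟨i0, l', hocceq⟩ : ∃ i0 l', occ data v = i0 :: l' := by
      cases h : occ data v with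
      | nil => exact absurd h (occ_ne_nil data v hvd)
      | cons a b => exact ⟨a, b, rfl⟩
    set rest := vs.flatMap (fun u => (occ data u).map (fun i => (u, i))) with hrest
    have hlist : (v :: vs).flatMap (fun u => (occ data u).map (fun i => (u, i)))
        = (v, i0) :: (l'.map (fun i => (v, i)) ++ rest) := by
      rw [List.flatMap_cons, hocceq, List.map_cons, List.cons_append]
    have hhead : ∀ q t', rest = q :: t' → q.1 ≠ v := by
      intro q t' hq hc
      have hq1 : q.1 ∈ vs := groups_head data vs q t' (by rw [← hrest]; exact hq)
      have := hvlt q.1 hq1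
      omega
    rw [hlist, outerB]
    have hr : runB (v, i0).1 (-1) 0 ((v, i0) :: (l'.map (fun i => (v, i)) ++ rest))
        = (((i0 :: l').foldl
              (fun st i => ((if i - st.2 > st.1 then i - st.2 else st.1), i)) (0, -1)).1,
           ((i0 :: l').foldl
              (fun st i => ((if i - st.2 > st.1 then i - st.2 else st.1), i)) (0, -1)).2,
           rest) := by
      show runB v (-1) 0 ((i0 :: l').map (fun i => (v, i)) ++ rest) = _
      exact runB_spec v (i0 :: l') rest (-1) 0 hhead
    rw [hr]
    dsimp only
    rw [runfold_spec (i0 :: l') 0 (-1)]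
    dsimp only
    have hi0 : 0 ≤ i0 := occ_nonneg data v i0 (by rw [hocceq]; simp)
    have hlast : (-1 :: i0 :: l').getLast (by simp) = (occ data v).getLastD (-1) := by
      rw [List.getLast_cons (by simp), hocceq]
      exact getLast_eq_getLastD _ (by simp)
    have hgeq : (if n - (-1 :: i0 :: l').getLast (by simp)
            > (zd (-1 :: i0 :: l')).foldl max 0
          then n - (-1 :: i0 :: l').getLast (by simp)
          else (zd (-1 :: i0 :: l')).foldl max 0)
        = G n data v := by
      rw [Mg_fold0 i0 l' hi0, hlast]
      unfold G
      rw [hocceq]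
      split <;> omega
    rw [hgeq]
    have hG1 : 1 ≤ G n data v := one_le_G n data v hvd
    have hassoc : ((ws ++ [v]) ++ vs) = ws ++ (v :: vs) := by simp
    by_cases hg : G n data v ≤ n
    · rw [if_pos hg]
      refine Eq.trans (outerB_spec n data hn vs (ws ++ [v]) _ _
        (fun u hu => hvall u (by simp [hu]))
        (fun u hu => by
          rcases List.mem_append.1 hu with h | h
          · exact hwall u h
          · simp only [List.mem_singleton] at h; exact h ▸ hvd)
        hpw'
        (fun u hu w hw => by
          rcases List.mem_append.1 hu with h | h
          · exact hlt u h w (by simp [hw])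
          · simp only [List.mem_singleton] at h; exact h ▸ hvlt w hw)
        (by rw [fill_aux_length]; exact hlen)
        (by split <;> omega)
        (by split <;> omega)
        ?_ ?_ ?_) (by rw [hassoc])
      · -- pointwise characterisation of the filled array
        intro j hj
        have hj0 : j < ans.length := by rwa [fill_aux_length] at hj
        have hjn : j < n.toNat := by rw [← hlen]; exact hj0
        have hjn' : (j : Int) + 1 ≤ n := by omega
        rw [fill_getElem v (G n data v - 1) lo (by omega) ans j hj0]
        rw [omin_append_singleton]
        by_cases hc1 : G n data v ≤ (j : Int) + 1
        · rw [if_pos (show decide (G n data v ≤ (j : Int) + 1) = true by simpa using hc1)]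
          by_cases hc2 : (j : Int) < lo
          · rw [if_pos (show G n data v - 1 ≤ (j : Int) ∧ (j : Int) < lo from ⟨by omega, hc2⟩)]
            have hnone : omin (fun u => G n data u ≤ (j : Int) + 1) ws = none := by
              refine omin_eq_none _ _ (fun u hu => ?_)
              by_cases hGu : G n data u ≤ n
              · have := h4 u hu hGu
                simp only [decide_eq_false_iff_not]
                omega
              · simp only [decide_eq_false_iff_not]
                omega
            rw [hnone]
            rfl
          · rw [if_neg (show ¬(G n data v - 1 ≤ (j : Int) ∧ (j : Int) < lo) from
                fun hc => hc2 hc.2)]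
            rw [h3 j hj0]
            obtain ⟨u, hu, hGu⟩ := h5 j (by omega) hjn
            cases homin : omin (fun u => G n data u ≤ (j : Int) + 1) ws with
            | none => exact absurd homin (omin_isSome _ _ u hu (by simpa using hGu))
            | some u0 =>
              have hu0 : u0 ∈ ws := (omin_mem _ _ _ homin).1
              have huv : u0 < v := hlt u0 hu0 v (by simp)
              show toOut (some u0) = toOut (aMin (some u0) (some v))
              simp [aMin, min_eq_left (le_of_lt huv), toOut]
        · rw [if_neg (show ¬(decide (G n data v ≤ (j : Int) + 1) = true) by simpa using hc1),
              if_neg (show ¬(G n data v - 1 ≤ (j : Int) ∧ (j : Int) < lo) from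
                fun hc => hc1 (by have := hc.1; omega))]
          exact h3 j hj0
      · -- the frontier stays below every placed gap
        intro u hu hGu
        rcases List.mem_append.1 hu with h | h
        · have := h4 u h hGu
          split <;> omega
        · simp only [List.mem_singleton] at h
          subst h
          split <;> omega
      · -- beyond the frontier some placed value covers j
        intro j h1 h2
        by_cases hjo : lo ≤ (j : Int)
        · obtain ⟨u, hu, hGu⟩ := h5 j hjo h2
          exact ⟨u, by simp [hu], hGu⟩
        · refine ⟨v, by simp, ?_⟩
          revert h1
          split
          · intro h1; omega
          · intro h1; omega
    · rw [if_neg hg]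
      refine Eq.trans (outerB_spec n data hn vs (ws ++ [v]) ans lo
        (fun u hu => hvall u (by simp [hu]))
        (fun u hu => by
          rcases List.mem_append.1 hu with h | h
          · exact hwall u h
          · simp only [List.mem_singleton] at h; exact h ▸ hvd)
        hpw'
        (fun u hu w hw => by
          rcases List.mem_append.1 hu with h | h
          · exact hlt u h w (by simp [hw])
          · simp only [List.mem_singleton] at h; exact h ▸ hvlt w hw)
        hlen hlo0 hlon
        ?_ ?_ ?_) (by rw [hassoc])
      · intro j hj
        have hjn : j < n.toNat := by rw [← hlen]; exact hj
        rw [h3 j hj, omin_append_singleton,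
          if_neg (show ¬(decide (G n data v ≤ (j : Int) + 1) = true) by
            simp only [decide_eq_true_eq]
            omega)]
      · intro u hu hGu
        rcases List.mem_append.1 hu with h | h
        · exact h4 u h hGu
        · simp only [List.mem_singleton] at h
          subst h
          omega
      · intro j h1 h2
        obtain ⟨u, hu, hGu⟩ := h5 j h1 h2
        exact ⟨u, by simp [hu], hGu⟩

theorem outerB_length (n : Int) : ∀ (l : List (Int × Int)) (ans : List Int) (lo : Int),
    (outerB n l ans lo).length = ans.length := by
  suffices H : ∀ (m : Nat) (l : List (Int × Int)), l.length ≤ m → ∀ (ans : List Int) (lo : Int),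
      (outerB n l ans lo).length = ans.length by
    intro l ans lo
    exact H l.length l le_rfl ans lo
  intro m
  induction m with
  | zero =>
    intro l hl ans lo
    have : l = [] := List.eq_nil_of_length_eq_zero (by omega)
    subst this
    simp [outerB]
  | succ m ih =>
    intro l hl ans lo
    cases l with
    | nil => simp [outerB]
    | cons p t =>
      rw [outerB]
      have hrun : (runB p.1 (-1) 0 (p :: t)).2.2.length ≤ m := by
        have h1 : (runB p.1 (-1) 0 (p :: t)).2.2.length ≤ t.length := by
          simp only [runB]
          exact runB_length_le _ _ _ t
        simp only [List.length_cons] at hl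
        omega
      repeat' split
      all_goals first
        | rw [ih _ hrun, fill_aux_length]
        | rw [ih _ hrun]

theorem B_spec (n : Int) (data : List Int) :
    minCommon_alt n data
      = specOut n data (PySem.List.sorted (PySem.List.dedup data) (fun x => x) false) := by
  unfold minCommon_alt
  dsimp only
  rw [pairs_eq_groups data]
  have hmemd : ∀ v ∈ PySem.List.sorted (PySem.List.dedup data) (fun x => x) false, v ∈ data := by
    intro v hv
    exact (PySem.List.mem_dedup data v).1 ((PySem.List.mem_sorted _ _ _ _).1 hv)
  by_cases hn : 0 < n
  · have hnn : ((n.toNat : Nat) : Int) = n := Int.toNat_of_nonneg (le_of_lt hn)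
    have hres := outerB_spec n data hn
      (PySem.List.sorted (PySem.List.dedup data) (fun x => x) false) []
      (List.replicate n.toNat (-1)) n
      hmemd
      (by intro u hu; simp at hu)
      (by
        have := PySem.List.sorted_ofList_pairwise_lt (xs := data)
        rwa [← PySem.List.dedup_eq_ofList] at this)
      (by intro u hu; simp at hu)
      (List.length_replicate)
      (by omega) le_rfl
      (by
        intro j hj
        rw [List.getElem_replicate]
        rfl)
      (by intro u hu; simp at hu)
      (by
        intro j h1 h2
        have : (j : Int) < n := by omega
        omega)
    simpa using hres
  · have h0 : n.toNat = 0 := by omega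
    have hlen := outerB_length n
      ((PySem.List.sorted (PySem.List.dedup data) (fun x => x) false).flatMap
        (fun v => (occ data v).map (fun i => (v, i))))
      (List.replicate n.toNat (-1)) n
    have hnil : outerB n
        ((PySem.List.sorted (PySem.List.dedup data) (fun x => x) false).flatMap
          (fun v => (occ data v).map (fun i => (v, i))))
        (List.replicate n.toNat (-1)) n = [] := by
      refine List.eq_nil_of_length_eq_zero ?_
      rw [hlen, List.length_replicate, h0]
    rw [hnil]
    simp [specOut, h0]

-- ===== VERDICT (by name: the statement is the Claim_ definition above) =====
theorem minCommon_spec : Claim_equal_minCommon := by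
  unfold Claim_equal_minCommon
  intro n data _
  unfold Spec_minCommon
  rw [A_spec, B_spec]
  unfold specOut
  have hperm : (PySem.List.dedup data).Perm
      (PySem.List.sorted (PySem.List.dedup data) (fun x => x) false) :=
    (PySem.List.sorted_perm _ _ _).symm
  exact List.map_congr_left (fun j _ => by rw [omin_perm _ _ _ hperm])
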